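-- pv_equiv track=rewrite | github.com/ryanranft/nba-mcp-synthesis | scripts/phase9_recommendation_processor.py | remove_circular_dependencies
-- ===== SOURCE A (Python) =====
-- from collections import defaultdict
-- from typing import Dict, List, Tuple, Set
--
-- def remove_circular_dependencies(edges: List[Dict]) -> List[Dict]:
--     """Remove circular dependencies from edge list"""
--     # Build adjacency list
--     adj = defaultdict(set)
--     for edge in edges:
--         adj[edge["from"]].add(edge["to"])
--
--     # Find cycles using DFS
--     def has_cycle(node, visited, rec_stack):
--         visited.add(node)
--         rec_stack.add(node)
--
--         for neighbor in adj[node]: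
--             if neighbor not in visited:
--                 if has_cycle(neighbor, visited, rec_stack):
--                     return True
--             elif neighbor in rec_stack:
--                 return True
--
--         rec_stack.remove(node)
--         return False
--
--     # Remove edges that create cycles
--     cleaned_edges = []
--     for edge in edges:
--         # Temporarily add edge and check for cycle
--         adj[edge["from"]].add(edge["to"])
--
--         visited = set()
--         rec_stack = set()
--         if not has_cycle(edge["from"], visited, rec_stack):
--             cleaned_edges.append(edge)
--         else:
--             adj[edge["from"]].remove(edge["to"])
--
--     return cleaned_edges
-- ===== SOURCE B (Python) =====
-- from collections import defaultdict
-- from typing import Dict, List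
--
--
-- def remove_circular_dependencies(edges: List[Dict]) -> List[Dict]:
--     """Remove circular dependencies from edge list (iterative-DFS variant)."""
--     adj = defaultdict(set)
--     for edge in edges:
--         adj[edge["from"]].add(edge["to"])
--
--     def has_cycle_iter(start):
--         # Iterative three-colour DFS with an explicit stack of
--         # (node, remaining-neighbours) frames; no Python recursion limit.
--         visited = {start}
--         on_path = {start}
--         stack = [(start, list(adj[start]))]
--         while stack:
--             node, ns = stack[-1]
--             if not ns:
--                 stack.pop()
--                 on_path.discard(node)
--             else:
--                 nb = ns.pop(0)
--                 if nb not in visited: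
--                     visited.add(nb)
--                     on_path.add(nb)
--                     stack.append((nb, list(adj[nb])))
--                 elif nb in on_path:
--                     return True
--         return False
--
--     cleaned_edges = []
--     for edge in edges:
--         adj[edge["from"]].add(edge["to"])
--         if has_cycle_iter(edge["from"]):
--             adj[edge["from"]].remove(edge["to"])
--         else:
--             cleaned_edges.append(edge)
--     return cleaned_edges
-- ===== Notes on version B (the rewrite author's own statement) =====
-- stated objective: alternative
-- what changed: A's recursive three-colour DFS cycle check is replaced by an iterative DFS over an explicit stack of (node, remaining-neighbours) frames with a visited set and an on-path set (no Python recursion limit); the outer edge-cleaning loop is kept.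
import Mathlib
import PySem

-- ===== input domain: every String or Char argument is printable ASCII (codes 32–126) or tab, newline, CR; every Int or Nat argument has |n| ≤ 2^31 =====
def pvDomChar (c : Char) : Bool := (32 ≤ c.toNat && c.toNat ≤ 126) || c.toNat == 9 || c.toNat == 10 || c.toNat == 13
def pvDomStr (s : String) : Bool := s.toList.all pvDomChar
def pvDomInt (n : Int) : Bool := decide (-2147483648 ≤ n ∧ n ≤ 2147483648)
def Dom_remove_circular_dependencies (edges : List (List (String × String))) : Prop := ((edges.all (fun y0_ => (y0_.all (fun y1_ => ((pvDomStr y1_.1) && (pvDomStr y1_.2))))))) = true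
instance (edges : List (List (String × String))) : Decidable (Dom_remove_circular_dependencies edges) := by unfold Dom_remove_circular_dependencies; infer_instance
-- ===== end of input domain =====

-- B replaces A's recursive three-colour DFS by an iterative DFS over an explicit stack of
-- (node, remaining-neighbours) frames (same outer loop, no recursion); return values proved equal.
-- Python iterates the set adj[node] in hash order; the DFS boolean does not depend on that order,
-- and both ports iterate the PySem.Set in its list order.

-- ===== PORT A =====
-- edge["from"] / edge["to"]: KeyError (missing key) is excluded by Pre_; getD "" is exact when the key is present.
def pvKey (edge : List (String × String)) (k : String) : String :=
  PySem.Dict.getD (PySem.Dict.ofList edge) k ""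

-- adj[node] on the defaultdict(set) (value read; the implicit insertion of an empty set is value-invisible)
def pvAdjGet (adj : PySem.Dict String (PySem.Set String)) (n : String) : PySem.Set String :=
  PySem.Dict.getD adj n PySem.Set.empty

-- 'for edge in edges: adj[edge["from"]].add(edge["to"])'
def pvBuildAdj (edges : List (List (String × String))) : PySem.Dict String (PySem.Set String) :=
  edges.foldl
    (fun adj e =>
      PySem.Dict.insert adj (pvKey e "from") (PySem.Set.add (pvAdjGet adj (pvKey e "from")) (pvKey e "to")))
    PySem.Dict.empty

-- the 'for neighbor in adj[node]' loop of has_cycle; rec_call is has_cycle at the remaining fuel.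
-- rec_stack.remove(node) never raises (node is always on the stack), so Set.discard is exact.
def pvHCLoop
    (rec_call : String → PySem.Set String → PySem.Set String → Bool × PySem.Set String × PySem.Set String)
    (node : String) :
    List String → PySem.Set String → PySem.Set String → Bool × PySem.Set String × PySem.Set String
  | [], vis, rs => (false, vis, PySem.Set.discard rs node)
  | nb :: ns, vis, rs =>
    if !(PySem.Set.contains vis nb) then
      match rec_call nb vis rs with
      | (true, v, r) => (true, v, r)
      | (false, v, r) => pvHCLoop rec_call node ns v r
    else if PySem.Set.contains rs nb then (true, vis, rs)
    else pvHCLoop rec_call node ns vis rs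

-- recursive has_cycle(node, visited, rec_stack); fuel only makes the recursion total
-- (each call visits a fresh node, so the proved bound is never exhausted on admitted inputs)
def pvHasCycle (adj : PySem.Dict String (PySem.Set String)) :
    Nat → String → PySem.Set String → PySem.Set String → Bool × PySem.Set String × PySem.Set String
  | 0, _, vis, rs => (true, vis, rs)
  | f + 1, node, vis, rs =>
    pvHCLoop (fun n v r => pvHasCycle adj f n v r) node (pvAdjGet adj node)
      (PySem.Set.add vis node) (PySem.Set.add rs node)

-- one iteration of A's 'for edge in edges' cleaning loop
def pvStepA (fuel : Nat) (st : PySem.Dict String (PySem.Set String) × List (List (String × String)))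
    (e : List (String × String)) :
    PySem.Dict String (PySem.Set String) × List (List (String × String)) :=
  let f := pvKey e "from"
  let t := pvKey e "to"
  let adj := PySem.Dict.insert st.1 f (PySem.Set.add (pvAdjGet st.1 f) t)
  if !(pvHasCycle adj fuel f PySem.Set.empty PySem.Set.empty).1 then
    (adj, st.2 ++ [e])
  else
    (PySem.Dict.insert adj f (PySem.Set.discard (pvAdjGet adj f) t), st.2)

def remove_circular_dependencies (edges : List (List (String × String))) : List (List (String × String)) :=
  (edges.foldl (pvStepA (2 * edges.length + 2)) (pvBuildAdj edges, [])).2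

-- ===== PORT B =====
-- iterative DFS: explicit stack of (node, remaining-neighbours) frames; head = top of stack.
-- fuel only makes the loop total (decreases on push; each push visits a fresh node).
def pvRun (adj : PySem.Dict String (PySem.Set String)) :
    Nat → List (String × List String) → PySem.Set String → PySem.Set String → Bool
  | _, [], _, _ => false
  | fuel, (node, []) :: rest, vis, rs => pvRun adj fuel rest vis (PySem.Set.discard rs node)
  | fuel, (node, nb :: ns) :: rest, vis, rs =>
    if !(PySem.Set.contains vis nb) then
      match fuel with
      | 0 => true
      | f + 1 =>
        pvRun adj f ((nb, pvAdjGet adj nb) :: (node, ns) :: rest)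
          (PySem.Set.add vis nb) (PySem.Set.add rs nb)
    else if PySem.Set.contains rs nb then true
    else pvRun adj fuel ((node, ns) :: rest) vis rs
  termination_by fuel st => (fuel, (st.map (fun fr => fr.2.length + 1)).sum)
  decreasing_by all_goals simp_all; omega

-- has_cycle_iter(start)
def pvHasCycleIter (adj : PySem.Dict String (PySem.Set String)) (fuel : Nat) (start : String) : Bool :=
  pvRun adj fuel ((start, pvAdjGet adj start) :: [])
    (PySem.Set.add PySem.Set.empty start) (PySem.Set.add PySem.Set.empty start)

-- one iteration of B's cleaning loop
def pvStepB (fuel : Nat) (st : PySem.Dict String (PySem.Set String) × List (List (String × String)))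
    (e : List (String × String)) :
    PySem.Dict String (PySem.Set String) × List (List (String × String)) :=
  let f := pvKey e "from"
  let t := pvKey e "to"
  let adj := PySem.Dict.insert st.1 f (PySem.Set.add (pvAdjGet st.1 f) t)
  if pvHasCycleIter adj fuel f then
    (PySem.Dict.insert adj f (PySem.Set.discard (pvAdjGet adj f) t), st.2)
  else
    (adj, st.2 ++ [e])

def remove_circular_dependencies_alt (edges : List (List (String × String))) : List (List (String × String)) :=
  (edges.foldl (pvStepB (2 * edges.length + 2)) (pvBuildAdj edges, [])).2

-- ===== PRECONDITION & SPEC =====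
-- Pre_ excludes exactly the inputs where A raises KeyError: an edge dict without a "from" or "to" key.
def Pre_remove_circular_dependencies (edges : List (List (String × String))) : Prop :=
  ∀ e ∈ edges, PySem.Dict.contains (PySem.Dict.ofList e) "from" = true ∧
    PySem.Dict.contains (PySem.Dict.ofList e) "to" = true

instance (edges : List (List (String × String))) : Decidable (Pre_remove_circular_dependencies edges) := by
  unfold Pre_remove_circular_dependencies; infer_instance

def pvWitness_remove_circular_dependencies : (List (List (String × String))) :=
  [[("from", "a"), ("to", "b")], [("from", "b"), ("to", "a")]]

def Spec_remove_circular_dependencies (edges : List (List (String × String))) (out : List (List (String × String))) : Prop := out = remove_circular_dependencies_alt edges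
instance (edges : List (List (String × String))) (out : List (List (String × String))) : Decidable (Spec_remove_circular_dependencies edges out) := by unfold Spec_remove_circular_dependencies; infer_instance

-- ===== CLAIM (what is proved, stated in full; the proofs are below) =====
def Claim_equal_remove_circular_dependencies : Prop := ∀ (edges : List (List (String × String))), Dom_remove_circular_dependencies edges → Pre_remove_circular_dependencies edges → Spec_remove_circular_dependencies edges (remove_circular_dependencies edges)

-- ===== LEMMAS AND PROOFS =====

-- the universe of possible DFS pushes: all "to" values of the input
def pvTos (edges : List (List (String × String))) : List String := edges.map (fun e => pvKey e "to")

-- number of not-yet-visited universe nodes: an upper bound on the remaining DFS pushes/calls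
def pvCnt (tos : List String) (vis : PySem.Set String) : Nat :=
  ((PySem.List.dedup tos).filter (fun x => decide (x ∉ vis))).length

-- every neighbour stored in adj is a "to" value
def pvNInv (adj : PySem.Dict String (PySem.Set String)) (tos : List String) : Prop :=
  ∀ s ∈ PySem.Dict.values adj, ∀ x ∈ s, x ∈ tos

theorem pvCnt_le (tos : List String) (vis : PySem.Set String) :
    pvCnt tos vis ≤ (PySem.List.dedup tos).length :=
  List.length_filter_le _ _

theorem pvCnt_pos (tos : List String) (vis : PySem.Set String) (nb : String)
    (h1 : nb ∈ tos) (h2 : nb ∉ vis) : 1 ≤ pvCnt tos vis := by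
  have hnb : nb ∈ PySem.List.dedup tos := (PySem.List.mem_dedup tos nb).mpr h1
  exact List.length_pos_of_mem (List.mem_filter.mpr ⟨hnb, by simpa using h2⟩)

theorem pvFilter_add (V : List String) (hnd : V.Nodup) (vis : PySem.Set String) (nb : String)
    (h1 : nb ∈ V) (h2 : nb ∉ vis) :
    (V.filter (fun x => decide (x ∉ PySem.Set.add vis nb))).length + 1
      = (V.filter (fun x => decide (x ∉ vis))).length := by
  induction V with
  | nil => cases h1
  | cons a V ih =>
    obtain ⟨ha, hnd'⟩ := List.nodup_cons.mp hnd
    by_cases hab : a = nb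
    · subst hab
      have hcongr : V.filter (fun x => decide (x ∉ PySem.Set.add vis a))
          = V.filter (fun x => decide (x ∉ vis)) := by
        apply List.filter_congr
        intro x hx
        have hxa : ¬ x = a := fun h => ha (h ▸ hx)
        simp [PySem.Set.mem_add, hxa]
      have e1 : (decide (a ∉ PySem.Set.add vis a)) = false := by simp [PySem.Set.mem_add]
      have e2 : (decide (a ∉ vis)) = true := by simpa using h2
      rw [List.filter_cons, List.filter_cons, e1, e2, hcongr, if_neg Bool.false_ne_true,
        if_pos rfl]
      simp
    · have h1' : nb ∈ V := by
        rcases List.mem_cons.mp h1 with h | h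
        · exact absurd h.symm hab
        · exact h
      have e : (decide (a ∉ PySem.Set.add vis nb)) = (decide (a ∉ vis)) := by
        simp [PySem.Set.mem_add, hab]
      rw [List.filter_cons, List.filter_cons, e]
      have hih := ih hnd' h1'
      by_cases hmem : a ∈ vis
      · have hd : decide (a ∉ vis) = false := by simpa using hmem
        rw [hd, if_neg Bool.false_ne_true, if_neg Bool.false_ne_true]
        exact hih
      · have hd : decide (a ∉ vis) = true := by simpa using hmem
        rw [hd, if_pos rfl, if_pos rfl]
        simp only [List.length_cons]
        omega

theorem pvCnt_add (tos : List String) (vis : PySem.Set String) (nb : String)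
    (h1 : nb ∈ tos) (h2 : nb ∉ vis) :
    pvCnt tos (PySem.Set.add vis nb) + 1 = pvCnt tos vis :=
  pvFilter_add _ (PySem.List.nodup_dedup _) vis nb ((PySem.List.mem_dedup tos nb).mpr h1) h2

theorem pvFilter_mono (V : List String) (vis vis' : PySem.Set String)
    (h : ∀ x, x ∈ vis → x ∈ vis') :
    (V.filter (fun x => decide (x ∉ vis'))).length ≤ (V.filter (fun x => decide (x ∉ vis))).length := by
  induction V with
  | nil => simp
  | cons a V ih =>
    rw [List.filter_cons, List.filter_cons]
    by_cases h1 : a ∈ vis'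
    · have e1 : (decide (a ∉ vis')) = false := by simpa using h1
      rw [e1, if_neg Bool.false_ne_true]
      by_cases h2 : a ∈ vis
      · have e2 : (decide (a ∉ vis)) = false := by simpa using h2
        rw [e2, if_neg Bool.false_ne_true]
        exact ih
      · have e2 : (decide (a ∉ vis)) = true := by simpa using h2
        rw [e2, if_pos rfl]
        simp only [List.length_cons]
        omega
    · have ha : a ∉ vis := fun hav => h1 (h a hav)
      have e1 : (decide (a ∉ vis')) = true := by simpa using h1
      have e2 : (decide (a ∉ vis)) = true := by simpa using ha
      rw [e1, e2, if_pos rfl, if_pos rfl]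
      simp only [List.length_cons]
      omega

theorem pvCnt_mono (tos : List String) (vis vis' : PySem.Set String)
    (h : ∀ x, x ∈ vis → x ∈ vis') : pvCnt tos vis' ≤ pvCnt tos vis :=
  pvFilter_mono _ vis vis' h

theorem pvAdjGet_sub (adj : PySem.Dict String (PySem.Set String)) (tos : List String)
    (hN : pvNInv adj tos) (n : String) : ∀ x ∈ pvAdjGet adj n, x ∈ tos := by
  intro x hx
  unfold pvAdjGet at hx
  rw [PySem.Dict.getD_eq_get?_getD] at hx
  cases hget : PySem.Dict.get? adj n with
  | none => rw [hget] at hx; simp [PySem.Set.empty] at hx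
  | some s =>
    rw [hget] at hx
    simp only [Option.getD_some] at hx
    have hit : (n, s) ∈ adj.items := PySem.Dict.mem_items_of_get?_eq_some adj hget
    have hs : s ∈ PySem.Dict.values adj := by
      simp only [PySem.Dict.values]
      exact List.mem_map.mpr ⟨(n, s), hit, rfl⟩
    exact hN s hs x hx

theorem pvNInv_insert_add (adj : PySem.Dict String (PySem.Set String)) (tos : List String)
    (hN : pvNInv adj tos) (f t : String) (ht : t ∈ tos) :
    pvNInv (PySem.Dict.insert adj f (PySem.Set.add (pvAdjGet adj f) t)) tos := by
  intro s hs x hx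
  rcases PySem.Dict.mem_values_insert _ _ _ _ hs with rfl | hs'
  · rcases (PySem.Set.mem_add _ _ _).mp hx with hx' | rfl
    · exact pvAdjGet_sub adj tos hN f x hx'
    · exact ht
  · exact hN s hs' x hx

theorem pvNInv_insert_discard (adj : PySem.Dict String (PySem.Set String)) (tos : List String)
    (hN : pvNInv adj tos) (f t : String) :
    pvNInv (PySem.Dict.insert adj f (PySem.Set.discard (pvAdjGet adj f) t)) tos := by
  intro s hs x hx
  rcases PySem.Dict.mem_values_insert _ _ _ _ hs with rfl | hs'
  · exact pvAdjGet_sub adj tos hN f x (((PySem.Set.mem_discard _ _ _).mp hx).1)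
  · exact hN s hs' x hx

theorem pvNInv_build (edges : List (List (String × String))) :
    pvNInv (pvBuildAdj edges) (pvTos edges) := by
  unfold pvBuildAdj
  have hgen : ∀ (l : List (List (String × String))) (adj : PySem.Dict String (PySem.Set String)),
      pvNInv adj (pvTos edges) → (∀ e ∈ l, pvKey e "to" ∈ pvTos edges) →
      pvNInv (l.foldl (fun adj e =>
        PySem.Dict.insert adj (pvKey e "from")
          (PySem.Set.add (pvAdjGet adj (pvKey e "from")) (pvKey e "to"))) adj) (pvTos edges) := by
    intro l
    induction l with
    | nil => intro adj hN _; exact hN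
    | cons e l ih =>
      intro adj hN hl
      simp only [List.foldl_cons]
      exact ih _ (pvNInv_insert_add adj _ hN _ _ (hl e List.mem_cons_self))
        (fun e' he' => hl e' (List.mem_cons_of_mem _ he'))
  apply hgen
  · intro s hs x hx
    simp [PySem.Dict.values, PySem.Dict.empty] at hs
  · intro e he
    exact List.mem_map.mpr ⟨e, he, rfl⟩

-- visited only grows through the neighbour loop / has_cycle
theorem pvLoop_mono
    (rc : String → PySem.Set String → PySem.Set String → Bool × PySem.Set String × PySem.Set String)
    (hrc : ∀ n v r x, x ∈ v → x ∈ (rc n v r).2.1) :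
    ∀ (node : String) (ns : List String) (vis rs : PySem.Set String) (x : String),
      x ∈ vis → x ∈ (pvHCLoop rc node ns vis rs).2.1 := by
  intro node ns
  induction ns with
  | nil => intro vis rs x hx; simpa [pvHCLoop] using hx
  | cons nb ns ih =>
    intro vis rs x hx
    simp only [pvHCLoop]
    cases hv : PySem.Set.contains vis nb with
    | false =>
      simp only [Bool.not_false, if_pos]
      rcases hres : rc nb vis rs with ⟨b, v, r⟩
      have hxv : x ∈ v := by
        have := hrc nb vis rs x hx
        rw [hres] at this
        exact this
      cases b with
      | true => simpa [hres] using hxv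
      | false => exact ih v r x hxv
    | true =>
      simp only [Bool.not_true, Bool.false_eq_true, if_false]
      cases hr : PySem.Set.contains rs nb with
      | true => simp only [if_pos]; exact hx
      | false => simp only [Bool.false_eq_true, if_false]; exact ih vis rs x hx

theorem pvHC_mono (adj : PySem.Dict String (PySem.Set String)) :
    ∀ (f : Nat) (node : String) (vis rs : PySem.Set String) (x : String),
      x ∈ vis → x ∈ (pvHasCycle adj f node vis rs).2.1 := by
  intro f
  induction f with
  | zero => intro node vis rs x hx; simpa [pvHasCycle] using hx
  | succ f ih =>
    intro node vis rs x hx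
    simp only [pvHasCycle]
    exact pvLoop_mono _ (fun n v r y hy => ih n v r y hy) node _ _ _ x
      ((PySem.Set.mem_add _ _ _).mpr (Or.inl hx))

-- step equations for the two loops
theorem pvRun_nil {adj : PySem.Dict String (PySem.Set String)} {g : Nat}
    {vis rs : PySem.Set String} : pvRun adj g [] vis rs = false := by
  rw [pvRun.eq_def]

theorem pvRun_pop {adj : PySem.Dict String (PySem.Set String)} {g : Nat} {node : String}
    {rest : List (String × List String)} {vis rs : PySem.Set String} :
    pvRun adj g ((node, []) :: rest) vis rs = pvRun adj g rest vis (PySem.Set.discard rs node) := by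
  rw [pvRun.eq_def]

theorem pvRun_push {adj : PySem.Dict String (PySem.Set String)} {g : Nat} {node nb : String}
    {ns : List String} {rest : List (String × List String)} {vis rs : PySem.Set String}
    (h : (!PySem.Set.contains vis nb) = true) :
    pvRun adj (g + 1) ((node, nb :: ns) :: rest) vis rs =
      pvRun adj g ((nb, pvAdjGet adj nb) :: (node, ns) :: rest)
        (PySem.Set.add vis nb) (PySem.Set.add rs nb) := by
  rw [pvRun.eq_def]
  simp at h
  simp [h]

theorem pvRun_hit {adj : PySem.Dict String (PySem.Set String)} {g : Nat} {node nb : String}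
    {ns : List String} {rest : List (String × List String)} {vis rs : PySem.Set String}
    (h1 : ¬ (!PySem.Set.contains vis nb) = true) (h2 : PySem.Set.contains rs nb = true) :
    pvRun adj g ((node, nb :: ns) :: rest) vis rs = true := by
  rw [pvRun.eq_def]
  simp at h1 h2
  simp [h1, h2]

theorem pvRun_skip {adj : PySem.Dict String (PySem.Set String)} {g : Nat} {node nb : String}
    {ns : List String} {rest : List (String × List String)} {vis rs : PySem.Set String}
    (h1 : ¬ (!PySem.Set.contains vis nb) = true) (h2 : ¬ PySem.Set.contains rs nb = true) :
    pvRun adj g ((node, nb :: ns) :: rest) vis rs = pvRun adj g ((node, ns) :: rest) vis rs := by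
  rw [pvRun.eq_def]
  simp at h1 h2
  simp [h1, h2]

theorem pvHCLoop_nil
    {rc : String → PySem.Set String → PySem.Set String → Bool × PySem.Set String × PySem.Set String}
    {node : String} {vis rs : PySem.Set String} :
    pvHCLoop rc node [] vis rs = (false, vis, PySem.Set.discard rs node) := rfl

theorem pvHCLoop_cons
    {rc : String → PySem.Set String → PySem.Set String → Bool × PySem.Set String × PySem.Set String}
    {node nb : String} {ns : List String} {vis rs : PySem.Set String}
    (h : (!PySem.Set.contains vis nb) = true) :
    pvHCLoop rc node (nb :: ns) vis rs =
      (match rc nb vis rs with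
       | (true, v, r) => (true, v, r)
       | (false, v, r) => pvHCLoop rc node ns v r) := by
  rw [pvHCLoop, if_pos h]

theorem pvHCLoop_hit
    {rc : String → PySem.Set String → PySem.Set String → Bool × PySem.Set String × PySem.Set String}
    {node nb : String} {ns : List String} {vis rs : PySem.Set String}
    (h1 : ¬ (!PySem.Set.contains vis nb) = true) (h2 : PySem.Set.contains rs nb = true) :
    pvHCLoop rc node (nb :: ns) vis rs = (true, vis, rs) := by
  rw [pvHCLoop, if_neg h1, if_pos h2]

theorem pvHCLoop_skip
    {rc : String → PySem.Set String → PySem.Set String → Bool × PySem.Set String × PySem.Set String}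
    {node nb : String} {ns : List String} {vis rs : PySem.Set String}
    (h1 : ¬ (!PySem.Set.contains vis nb) = true) (h2 : ¬ PySem.Set.contains rs nb = true) :
    pvHCLoop rc node (nb :: ns) vis rs = pvHCLoop rc node ns vis rs := by
  rw [pvHCLoop, if_neg h1, if_neg h2]

-- the iterative DFS's value does not depend on the (sufficient) fuel
theorem pvRun_irrel (adj : PySem.Dict String (PySem.Set String)) (tos : List String)
    (hN : pvNInv adj tos) :
    ∀ (g : Nat) (st : List (String × List String)) (vis rs : PySem.Set String),
      (∀ fr ∈ st, ∀ x ∈ fr.2, x ∈ tos) → pvCnt tos vis ≤ g →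
      ∀ g', pvCnt tos vis ≤ g' → pvRun adj g st vis rs = pvRun adj g' st vis rs := by
  intro g st vis rs
  fun_induction pvRun adj g st vis rs
  · intro _ _ g' _
    rw [pvRun_nil]
  · next fuel node rest vis rs ih =>
    intro hst hf g' hg'
    rw [pvRun_pop (g := g')]
    exact ih (fun fr hfr => hst fr (List.mem_cons_of_mem _ hfr)) hf g' hg'
  · next node nb ns rest vis rs h =>
    intro hst hf g' hg'
    have hnb : nb ∈ tos := hst _ List.mem_cons_self nb List.mem_cons_self
    have hv' : PySem.Set.contains vis nb = false := by rwa [Bool.not_eq_true'] at h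
    have hnbv : nb ∉ vis := fun hmem =>
      Bool.false_ne_true (hv' ▸ (PySem.Set.contains_iff _ _).mpr hmem)
    have := pvCnt_pos tos vis nb hnb hnbv
    omega
  · next node nb ns rest vis rs h f ih =>
    intro hst hf g' hg'
    have hnb : nb ∈ tos := hst _ List.mem_cons_self nb List.mem_cons_self
    have hv' : PySem.Set.contains vis nb = false := by rwa [Bool.not_eq_true'] at h
    have hnbv : nb ∉ vis := fun hmem =>
      Bool.false_ne_true (hv' ▸ (PySem.Set.contains_iff _ _).mpr hmem)
    have hpos := pvCnt_pos tos vis nb hnb hnbv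
    have hdec := pvCnt_add tos vis nb hnb hnbv
    obtain ⟨g2, rfl⟩ : ∃ k, g' = k + 1 := ⟨g' - 1, by omega⟩
    rw [pvRun_push h]
    have hst' : ∀ fr ∈ (nb, pvAdjGet adj nb) :: (node, ns) :: rest, ∀ x ∈ fr.2, x ∈ tos := by
      intro fr hfr x hx
      rcases List.mem_cons.mp hfr with rfl | hfr'
      · exact pvAdjGet_sub adj tos hN nb x hx
      · rcases List.mem_cons.mp hfr' with rfl | hfr''
        · exact hst (node, nb :: ns) List.mem_cons_self x (List.mem_cons_of_mem _ hx)
        · exact hst fr (List.mem_cons_of_mem _ hfr'') x hx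
    exact ih hst' (by omega) g2 (by omega)
  · next fuel node nb ns rest vis rs h1 h2 =>
    intro _ _ g' _
    rw [pvRun_hit h1 h2]
  · next fuel node nb ns rest vis rs h1 h2 ih =>
    intro hst hf g' hg'
    rw [pvRun_skip h1 h2]
    have hst' : ∀ fr ∈ (node, ns) :: rest, ∀ x ∈ fr.2, x ∈ tos := by
      intro fr hfr x hx
      rcases List.mem_cons.mp hfr with rfl | hfr'
      · exact hst (node, nb :: ns) List.mem_cons_self x (List.mem_cons_of_mem _ hx)
      · exact hst fr (List.mem_cons_of_mem _ hfr') x hx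
    exact ih hst' hf g' hg'

-- continuation combinator: 'true' on a found cycle, otherwise continue with the final sets
def pvCont (res : Bool × PySem.Set String × PySem.Set String)
    (k : PySem.Set String → PySem.Set String → Bool) : Bool :=
  match res with
  | (true, _, _) => true
  | (false, v, r) => k v r

-- the bridge: one machine frame computes exactly A's neighbour loop, then continues with the rest
theorem pvBridge (adj : PySem.Dict String (PySem.Set String)) (tos : List String)
    (hN : pvNInv adj tos) :
    ∀ (f : Nat) (ns : List String) (node : String) (vis rs : PySem.Set String)
      (rest : List (String × List String)) (g : Nat),
      (∀ x ∈ ns, x ∈ tos) → (∀ fr ∈ rest, ∀ x ∈ fr.2, x ∈ tos) →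
      pvCnt tos vis ≤ f → pvCnt tos vis ≤ g →
      pvRun adj g ((node, ns) :: rest) vis rs =
        pvCont (pvHCLoop (fun n v r => pvHasCycle adj f n v r) node ns vis rs)
          (fun v r => pvRun adj g rest v r) := by
  intro f
  induction f with
  | zero =>
    intro ns node vis rs rest g
    induction ns generalizing vis rs g with
    | nil =>
      intro hns hrest hf hg
      rw [pvRun_pop, pvHCLoop_nil]
      rfl
    | cons nb ns ihns =>
      intro hns hrest hf hg
      cases hv : PySem.Set.contains vis nb with
      | false =>
        exfalso
        have hnbv : nb ∉ vis := fun hmem =>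
          Bool.false_ne_true (hv ▸ (PySem.Set.contains_iff _ _).mpr hmem)
        have := pvCnt_pos tos vis nb (hns nb List.mem_cons_self) hnbv
        omega
      | true =>
        have h1 : ¬ (!PySem.Set.contains vis nb) = true := by rw [hv]; decide
        cases hr : PySem.Set.contains rs nb with
        | true =>
          rw [pvRun_hit h1 hr, pvHCLoop_hit h1 hr]
          rfl
        | false =>
          have h2 : ¬ PySem.Set.contains rs nb = true := by rw [hr]; decide
          rw [pvRun_skip h1 h2, pvHCLoop_skip h1 h2]
          exact ihns vis rs g (fun x hx => hns x (List.mem_cons_of_mem _ hx)) hrest hf hg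
  | succ f ihf =>
    intro ns node vis rs rest g
    induction ns generalizing vis rs g with
    | nil =>
      intro hns hrest hf hg
      rw [pvRun_pop, pvHCLoop_nil]
      rfl
    | cons nb ns ihns =>
      intro hns hrest hf hg
      cases hv : PySem.Set.contains vis nb with
      | true =>
        have h1 : ¬ (!PySem.Set.contains vis nb) = true := by rw [hv]; decide
        cases hr : PySem.Set.contains rs nb with
        | true =>
          rw [pvRun_hit h1 hr, pvHCLoop_hit h1 hr]
          rfl
        | false =>
          have h2 : ¬ PySem.Set.contains rs nb = true := by rw [hr]; decide
          rw [pvRun_skip h1 h2, pvHCLoop_skip h1 h2]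
          exact ihns vis rs g (fun x hx => hns x (List.mem_cons_of_mem _ hx)) hrest hf hg
      | false =>
        have h1 : (!PySem.Set.contains vis nb) = true := by rw [hv]; rfl
        have hnb : nb ∈ tos := hns nb List.mem_cons_self
        have hnbv : nb ∉ vis := fun hmem =>
          Bool.false_ne_true (hv ▸ (PySem.Set.contains_iff _ _).mpr hmem)
        have hpos := pvCnt_pos tos vis nb hnb hnbv
        have hdec := pvCnt_add tos vis nb hnb hnbv
        obtain ⟨g0, rfl⟩ : ∃ k, g = k + 1 := ⟨g - 1, by omega⟩
        rw [pvRun_push h1, pvHCLoop_cons h1]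
        have hstack1 : ∀ fr ∈ (node, ns) :: rest, ∀ x ∈ fr.2, x ∈ tos := by
          intro fr hfr x hx
          rcases List.mem_cons.mp hfr with rfl | hfr'
          · exact hns x (List.mem_cons_of_mem _ hx)
          · exact hrest fr hfr' x hx
        have hbr := ihf (pvAdjGet adj nb) nb (PySem.Set.add vis nb) (PySem.Set.add rs nb)
          ((node, ns) :: rest) g0 (pvAdjGet_sub adj tos hN nb) hstack1 (by omega) (by omega)
        rw [hbr]
        rcases hres : pvHCLoop (fun n v r => pvHasCycle adj f n v r) nb (pvAdjGet adj nb)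
            (PySem.Set.add vis nb) (PySem.Set.add rs nb) with ⟨b, v, r⟩
        have hrc : pvHasCycle adj (f + 1) nb vis rs = (b, v, r) := hres
        have hsubv : ∀ x, x ∈ PySem.Set.add vis nb → x ∈ v := by
          intro x hx
          have hm := pvLoop_mono _ (fun n v' r' y hy => pvHC_mono adj f n v' r' y hy)
            nb (pvAdjGet adj nb) (PySem.Set.add vis nb) (PySem.Set.add rs nb) x hx
          rw [hres] at hm
          exact hm
        have hcv : pvCnt tos v ≤ pvCnt tos (PySem.Set.add vis nb) := pvCnt_mono tos _ _ hsubv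
        rw [hrc]
        cases b with
        | true => rfl
        | false =>
          show pvRun adj g0 ((node, ns) :: rest) v r =
            pvCont (pvHCLoop (fun n v' r' => pvHasCycle adj (f + 1) n v' r') node ns v r)
              (fun v' r' => pvRun adj (g0 + 1) rest v' r')
          have hloop := ihns v r g0 (fun x hx => hns x (List.mem_cons_of_mem _ hx)) hrest
            (by omega) (by omega)
          rw [hloop]
          rcases hres2 : pvHCLoop (fun n v' r' => pvHasCycle adj (f + 1) n v' r') node ns v r
            with ⟨b2, v2, r2⟩
          have hsubv2 : ∀ x, x ∈ v → x ∈ v2 := by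
            intro x hx
            have hm := pvLoop_mono _ (fun n v' r' y hy => pvHC_mono adj (f + 1) n v' r' y hy)
              node ns v r x hx
            rw [hres2] at hm
            exact hm
          have hcv2 : pvCnt tos v2 ≤ pvCnt tos v := pvCnt_mono tos _ _ hsubv2
          cases b2 with
          | true => rfl
          | false =>
            show pvRun adj g0 rest v2 r2 = pvRun adj (g0 + 1) rest v2 r2
            exact pvRun_irrel adj tos hN g0 rest v2 r2 hrest (by omega) (g0 + 1) (by omega)

-- per-edge: A's recursive check and B's iterative check agree
theorem pvCheck_eq (adj : PySem.Dict String (PySem.Set String)) (tos : List String)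
    (hN : pvNInv adj tos) (src : String) (K g : Nat)
    (hK : (PySem.List.dedup tos).length ≤ K) (hg : (PySem.List.dedup tos).length ≤ g) :
    pvHasCycleIter adj g src = (pvHasCycle adj (K + 1) src PySem.Set.empty PySem.Set.empty).1 := by
  unfold pvHasCycleIter
  have hb := pvBridge adj tos hN K (pvAdjGet adj src) src
    (PySem.Set.add PySem.Set.empty src) (PySem.Set.add PySem.Set.empty src) [] g
    (pvAdjGet_sub adj tos hN src) (by intro fr hfr; cases hfr)
    (le_trans (pvCnt_le tos _) hK) (le_trans (pvCnt_le tos _) hg)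
  rw [hb]
  show pvCont (pvHCLoop (fun n v r => pvHasCycle adj K n v r) src (pvAdjGet adj src)
      (PySem.Set.add PySem.Set.empty src) (PySem.Set.add PySem.Set.empty src))
      (fun v r => pvRun adj g [] v r)
    = (pvHCLoop (fun n v r => pvHasCycle adj K n v r) src (pvAdjGet adj src)
      (PySem.Set.add PySem.Set.empty src) (PySem.Set.add PySem.Set.empty src)).1
  rcases hres : pvHCLoop (fun n v r => pvHasCycle adj K n v r) src (pvAdjGet adj src)
      (PySem.Set.add PySem.Set.empty src) (PySem.Set.add PySem.Set.empty src) with ⟨b, v, r⟩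
  cases b with
  | true => rfl
  | false => exact pvRun_nil

theorem pvFold_eq (tos : List String) (FA FB : Nat)
    (hFA : (PySem.List.dedup tos).length + 1 ≤ FA) (hFB : (PySem.List.dedup tos).length ≤ FB) :
    ∀ (l : List (List (String × String))) (adj : PySem.Dict String (PySem.Set String))
      (cleaned : List (List (String × String))),
      (∀ e ∈ l, pvKey e "to" ∈ tos) → pvNInv adj tos →
      l.foldl (pvStepA FA) (adj, cleaned) = l.foldl (pvStepB FB) (adj, cleaned) := by
  obtain ⟨K, rfl⟩ : ∃ K, FA = K + 1 := ⟨FA - 1, by omega⟩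
  intro l
  induction l with
  | nil => intro adj cleaned _ _; rfl
  | cons e l ih =>
    intro adj cleaned hl hN
    have ht : pvKey e "to" ∈ tos := hl e List.mem_cons_self
    have hN' : pvNInv (PySem.Dict.insert adj (pvKey e "from")
        (PySem.Set.add (pvAdjGet adj (pvKey e "from")) (pvKey e "to"))) tos :=
      pvNInv_insert_add adj tos hN _ _ ht
    have hc := pvCheck_eq _ tos hN' (pvKey e "from") K FB (by omega) hFB
    simp only [List.foldl_cons]
    have hstep : pvStepA (K + 1) (adj, cleaned) e = pvStepB FB (adj, cleaned) e := by
      unfold pvStepA pvStepB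
      simp only []
      rw [hc]
      cases hbv : (pvHasCycle (PySem.Dict.insert adj (pvKey e "from")
          (PySem.Set.add (pvAdjGet adj (pvKey e "from")) (pvKey e "to"))) (K + 1) (pvKey e "from")
          PySem.Set.empty PySem.Set.empty).1 with
      | true => simp
      | false => simp
    rw [hstep]
    rcases hsb : pvStepB FB (adj, cleaned) e with ⟨adj2, cleaned2⟩
    have hN2 : pvNInv adj2 tos := by
      unfold pvStepB at hsb
      simp only [] at hsb
      split at hsb
      · cases hsb; exact pvNInv_insert_discard _ tos hN' _ _
      · cases hsb; exact hN'
    exact ih adj2 cleaned2 (fun e' he' => hl e' (List.mem_cons_of_mem _ he')) hN2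

-- ===== VERDICT (by name: the statement is the Claim_ definition above) =====
theorem remove_circular_dependencies_spec : Claim_equal_remove_circular_dependencies := by
  intro edges _ _
  unfold Spec_remove_circular_dependencies remove_circular_dependencies remove_circular_dependencies_alt
  rw [pvFold_eq (pvTos edges) (2 * edges.length + 2) (2 * edges.length + 2) ?_ ?_ edges _ []
      (fun e he => List.mem_map.mpr ⟨e, he, rfl⟩) (pvNInv_build edges)]
  · have h := PySem.Set.length_ofList_le (xs := pvTos edges)
    have : (pvTos edges).length = edges.length := by simp [pvTos]
    simp [PySem.List.dedup_eq_ofList] at *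
    omega
  · have h := PySem.Set.length_ofList_le (xs := pvTos edges)
    have : (pvTos edges).length = edges.length := by simp [pvTos]
    simp [PySem.List.dedup_eq_ofList] at *
    omega
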